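-- pv_equiv track=rewrite | github.com/lwilanski/Algorithms-and-Data-Structures | assignments/zad2/zad2.py | snow
-- ===== SOURCE A (Python) =====
-- def snow(S):
--     def merge_sort(T):
--         mid=len(T)//2
--         l=T[:mid]
--         r=T[mid:]
--         if len(l)>1:
--             l=merge_sort(l)
--         if len(r)>1:
--             r=merge_sort(r)
--         return(merge(l,r))
--
--     def merge(A,B):
--         W=[]
--         i,j=0,0
--         while i<len(A) and j<len(B):
--             if A[i]<B[j]:
--                 W.append(A[i])
--                 i+=1
--             else:
--                 W.append(B[j])
--                 j+=1
--         W.extend(A[i:])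
--         W.extend(B[j:])
--         return W
--
--     wawoz=merge_sort(S)
--     czas=0
--     snieg=0
--
--     for i in range(len(wawoz)-1,0,-1):
--         if wawoz[i]-czas>0:
--             snieg+=wawoz[i]-czas
--         else:
--             break
--         czas+=1
--
--     return snieg
-- ===== SOURCE B (Python) =====
-- def snow(S):
--     pool = list(S)
--     czas = 0
--     total = 0
--     while len(pool) > 1:
--         v = max(pool)
--         if v - czas <= 0:
--             break
--         total += v - czas
--         pool.remove(v)
--         czas += 1
--     return total
-- ===== Notes on version B (the rewrite author's own statement) =====
-- stated objective: alternative
-- what changed: A fully sorts with a hand-written merge sort and then scans the array top-down; B never sorts: it does lazy selection, repeatedly taking max() of an unsorted pool and removing it, stopping as soon as the leftover max(pool)-czas is non-positive or one element remains.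
import Mathlib
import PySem

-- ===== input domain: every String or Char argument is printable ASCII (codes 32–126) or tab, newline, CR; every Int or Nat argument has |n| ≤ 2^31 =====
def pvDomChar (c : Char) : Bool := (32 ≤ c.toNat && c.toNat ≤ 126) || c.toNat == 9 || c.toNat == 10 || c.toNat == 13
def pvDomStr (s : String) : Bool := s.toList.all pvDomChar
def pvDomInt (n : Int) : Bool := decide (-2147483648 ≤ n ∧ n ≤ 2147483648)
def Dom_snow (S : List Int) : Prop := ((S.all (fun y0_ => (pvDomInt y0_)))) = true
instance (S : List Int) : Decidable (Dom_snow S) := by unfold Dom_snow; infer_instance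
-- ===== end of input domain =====

-- B drops A's merge-sort-then-scan entirely: it extracts the needed largest elements lazily
-- (max() + remove() on an unsorted pool), stopping at the break condition (alternative algorithm).

-- ===== PORT A =====
-- A's inner `merge`: the while loop emits the smaller head (right on ties), then extends leftovers.
def pvMergeA : List Int → List Int → List Int
  | [], B => B
  | a :: as, [] => a :: as
  | a :: as, b :: bs =>
      if a < b then a :: pvMergeA as (b :: bs) else b :: pvMergeA (a :: as) bs

-- A's `merge_sort`: mid = len//2, l = T[:mid], r = T[mid:], recurse only on parts of length > 1.
def pvMergeSortA (T : List Int) : List Int :=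
  pvMergeA
    (if 1 < (T.take (T.length / 2)).length then pvMergeSortA (T.take (T.length / 2))
     else T.take (T.length / 2))
    (if 1 < (T.drop (T.length / 2)).length then pvMergeSortA (T.drop (T.length / 2))
     else T.drop (T.length / 2))
termination_by T.length
decreasing_by
  · simp only [List.length_take] at *; omega
  · simp only [List.length_drop] at *; omega

-- A's final `for i in range(len(wawoz)-1, 0, -1)` with its break;
-- `w.getD i 0` is exact for `wawoz[i]` because 1 ≤ i < len(wawoz) on every iteration.
def pvSnowLoopA (w : List Int) : Nat → Int → Int → Int
  | 0, _, snieg => snieg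
  | i + 1, czas, snieg =>
      let v := w.getD (i + 1) 0
      if v - czas > 0 then pvSnowLoopA w i (czas + 1) (snieg + (v - czas))
      else snieg

def snow (S : List Int) : Int :=
  let wawoz := pvMergeSortA S
  pvSnowLoopA wawoz (wawoz.length - 1) 0 0

-- ===== PORT B =====
-- Source B's while loop: len(pool) > 1 → v = max(pool); break if v - czas <= 0;
-- total += v - czas; pool.remove(v); czas += 1.  max → PySem.List.max? (first maximum),
-- remove → PySem.List.remove? (first occurrence); both are some on the nonempty pool,
-- the none arms are unreachable.
def pvSelectLoopB (pool : List Int) (czas total : Int) : Int :=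
  if pool.length ≤ 1 then total
  else
    match PySem.List.max? pool (fun x => x) with
    | none => total
    | some v =>
      if v - czas ≤ 0 then total
      else
        match hr : PySem.List.remove? pool v with
        | none => total
        | some p => pvSelectLoopB p (czas + 1) (total + (v - czas))
termination_by pool.length
decreasing_by
  have hv : v ∈ pool := by
    by_contra hv
    rw [(PySem.List.remove?_eq_none_iff pool v).2 hv] at hr
    simp at hr
  rw [PySem.List.remove?_eq_some_erase pool v hv] at hr
  obtain rfl := Option.some.inj hr
  have := List.length_erase_of_mem hv
  omega

def snow_alt (S : List Int) : Int := pvSelectLoopB S 0 0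

-- ===== PRECONDITION & SPEC =====
def Spec_snow (S : List Int) (out : Int) : Prop := out = snow_alt S
instance (S : List Int) (out : Int) : Decidable (Spec_snow S out) := by unfold Spec_snow; infer_instance

-- ===== CLAIM (what is proved, stated in full; the proofs are below) =====
def Claim_equal_snow : Prop := ∀ (S : List Int), Dom_snow S → Spec_snow S (snow S)

-- ===== LEMMAS AND PROOFS =====

theorem pvMergeA_perm (A B : List Int) : (pvMergeA A B).Perm (A ++ B) := by
  fun_induction pvMergeA with
  | case1 B => simp
  | case2 a as => simp
  | case3 a as b bs h ih => simpa using ih.cons a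
  | case4 a as b bs h ih =>
      refine (ih.cons b).trans ?_
      simpa using (List.perm_middle (a := b) (l₁ := a :: as) (l₂ := bs)).symm

theorem mem_pvMergeA {x : Int} {A B : List Int} :
    x ∈ pvMergeA A B ↔ x ∈ A ∨ x ∈ B := by
  rw [(pvMergeA_perm A B).mem_iff, List.mem_append]

theorem pvMergeA_sorted {A B : List Int}
    (hA : A.Pairwise (· ≤ ·)) (hB : B.Pairwise (· ≤ ·)) :
    (pvMergeA A B).Pairwise (· ≤ ·) := by
  fun_induction pvMergeA with
  | case1 B => exact hB
  | case2 a as => exact hA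
  | case3 a as b bs h ih =>
      obtain ⟨ha, hA'⟩ := List.pairwise_cons.1 hA
      obtain ⟨hb, hB'⟩ := List.pairwise_cons.1 hB
      refine List.pairwise_cons.2 ⟨?_, ih hA' hB⟩
      intro x hx
      rcases mem_pvMergeA.1 hx with hx | hx
      · exact ha x hx
      · rcases List.mem_cons.1 hx with rfl | hx
        · exact le_of_lt h
        · exact le_of_lt (lt_of_lt_of_le h (hb x hx))
  | case4 a as b bs h ih =>
      obtain ⟨ha, hA'⟩ := List.pairwise_cons.1 hA
      obtain ⟨hb, hB'⟩ := List.pairwise_cons.1 hB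
      refine List.pairwise_cons.2 ⟨?_, ih hA hB'⟩
      intro x hx
      rcases mem_pvMergeA.1 hx with hx | hx
      · rcases List.mem_cons.1 hx with rfl | hx
        · omega
        · exact le_trans (by omega) (ha x hx)
      · exact hb x hx

theorem pvMergeSortA_perm (T : List Int) : (pvMergeSortA T).Perm T := by
  fun_induction pvMergeSortA T with
  | case1 T ihl ihr =>
      have hl : (if 1 < (T.take (T.length / 2)).length then pvMergeSortA (T.take (T.length / 2))
          else T.take (T.length / 2)).Perm (T.take (T.length / 2)) := by
        split
        · exact ihl ‹_›
        · exact List.Perm.refl _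
      have hr : (if 1 < (T.drop (T.length / 2)).length then pvMergeSortA (T.drop (T.length / 2))
          else T.drop (T.length / 2)).Perm (T.drop (T.length / 2)) := by
        split
        · exact ihr ‹_›
        · exact List.Perm.refl _
      refine (pvMergeA_perm _ _).trans ((hl.append hr).trans ?_)
      rw [List.take_append_drop]

theorem pairwise_of_len_le_one {l : List Int} (h : l.length ≤ 1) : l.Pairwise (· ≤ ·) := by
  match l, h with
  | [], _ => exact List.Pairwise.nil
  | [x], _ => simp

theorem pvMergeSortA_sorted (T : List Int) : (pvMergeSortA T).Pairwise (· ≤ ·) := by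
  fun_induction pvMergeSortA T with
  | case1 T ihl ihr =>
      refine pvMergeA_sorted ?_ ?_
      · split
        · exact ihl ‹_›
        · exact pairwise_of_len_le_one (by omega)
      · split
        · exact ihr ‹_›
        · exact pairwise_of_len_le_one (by omega)

-- python sorted(S, reverse=True) = reverse of A's merge sort (two non-increasing permutations of S coincide over Int)
theorem sorted_rev_eq_reverse (S : List Int) :
    PySem.List.sorted S (fun x => x) true = (pvMergeSortA S).reverse := by
  refine List.Perm.eq_of_pairwise (le := fun a b => b ≤ a)
    (fun a b _ _ h1 h2 => le_antisymm h2 h1) ?_ ?_ ?_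
  · exact PySem.List.sorted_pairwise_rev S (fun x => x)
  · exact (List.pairwise_reverse).2 ((pvMergeSortA_sorted S).imp fun h => h)
  · exact (PySem.List.sorted_perm S (fun x => x) true).trans
      ((pvMergeSortA_perm S).symm.trans (List.reverse_perm _).symm)

-- the break-loop of A, rephrased over the descending list it visits
def pvGoA : List Int → Int → Int → Int
  | [], _, snieg => snieg
  | v :: rest, czas, snieg =>
      if v - czas > 0 then pvGoA rest (czas + 1) (snieg + (v - czas)) else snieg

-- A's index loop visits w[i], w[i-1], …, w[1]: it is the break-loop over reverse (w[1:i+1])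
theorem pvSnowLoopA_eq_goA (w : List Int) :
    ∀ (i : Nat), i < w.length → ∀ (czas snieg : Int),
      pvSnowLoopA w i czas snieg = pvGoA (((w.take (i + 1)).drop 1).reverse) czas snieg := by
  intro i
  induction i with
  | zero => intro _ czas snieg; simp [pvSnowLoopA, pvGoA]
  | succ i ih =>
      intro hi czas snieg
      have hlt : i + 1 < w.length := hi
      have htake : w.take (i + 2) = w.take (i + 1) ++ [w[i + 1]] := by
        rw [List.take_add_one]; simp [List.getElem?_eq_getElem hlt]
      have hrev : ((w.take (i + 2)).drop 1).reverse
          = w[i + 1] :: ((w.take (i + 1)).drop 1).reverse := by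
        rw [htake, List.drop_append_of_le_length (by rw [List.length_take]; omega)]
        simp
      have hget : w.getD (i + 1) 0 = w[i + 1] := List.getD_eq_getElem w 0 hlt
      rw [hrev]
      show pvSnowLoopA w (i + 1) czas snieg = _
      simp only [pvSnowLoopA, pvGoA, hget]
      split
      · exact ih (by omega) (czas + 1) (snieg + (w[i+1] - czas))
      · rfl

-- extracting the first maximum of a nonempty pool peels the head of sorted(pool, reverse=True)
theorem sorted_rev_cons_max (pool : List Int) (v : Int)
    (hm : PySem.List.max? pool (fun x => x) = some v) :
    PySem.List.sorted pool (fun x => x) true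
      = v :: PySem.List.sorted (pool.erase v) (fun x => x) true := by
  have hv : v ∈ pool := PySem.List.max?_mem hm
  have hmax : ∀ y ∈ pool, y ≤ v := by
    intro y hy; exact PySem.List.max?_isMax hm y hy
  refine List.Perm.eq_of_pairwise (le := fun a b => b ≤ a)
    (fun a b _ _ h1 h2 => le_antisymm h2 h1) ?_ ?_ ?_
  · exact PySem.List.sorted_pairwise_rev pool (fun x => x)
  · refine List.pairwise_cons.2 ⟨?_, PySem.List.sorted_pairwise_rev _ (fun x => x)⟩
    intro x hx
    have : x ∈ pool.erase v := (PySem.List.mem_sorted _ _ _ _).1 hx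
    exact hmax x (List.mem_of_mem_erase this)
  · refine (PySem.List.sorted_perm pool (fun x => x) true).trans ?_
    exact (List.perm_cons_erase hv).trans
      (((PySem.List.sorted_perm (pool.erase v) (fun x => x) true).symm).cons v)

-- B's lazy selection = A's break-loop over the top len-1 elements in descending order
theorem pvSelectLoopB_eq_goA (n : Nat) :
    ∀ (pool : List Int), pool.length = n → ∀ (czas total : Int),
      pvSelectLoopB pool czas total
        = pvGoA ((PySem.List.sorted pool (fun x => x) true).take (pool.length - 1)) czas total := by
  induction n using Nat.strong_induction_on with
  | _ n ih =>
      intro pool hn czas total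
      rw [pvSelectLoopB.eq_def]
      by_cases hle : pool.length ≤ 1
      · rw [if_pos hle]
        have : pool.length - 1 = 0 := by omega
        rw [this, List.take_zero]
        rfl
      · rw [if_neg hle]
        have hne : pool ≠ [] := by
          intro h; subst h; simp at hle
        obtain ⟨v, hm⟩ : ∃ v, PySem.List.max? pool (fun x => x) = some v := by
          cases hmm : PySem.List.max? pool (fun x => x) with
          | none => exact absurd ((PySem.List.max?_eq_none_iff _ _).1 hmm) hne
          | some v => exact ⟨v, rfl⟩
        rw [hm]
        have hv : v ∈ pool := PySem.List.max?_mem hm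
        have hsort := sorted_rev_cons_max pool v hm
        have hlen : (pool.erase v).length = pool.length - 1 := List.length_erase_of_mem hv
        have htake : (PySem.List.sorted pool (fun x => x) true).take (pool.length - 1)
            = v :: (PySem.List.sorted (pool.erase v) (fun x => x) true).take ((pool.erase v).length - 1) := by
          rw [hsort]
          have h1 : pool.length - 1 = ((pool.erase v).length - 1) + 1 := by omega
          rw [h1, List.take_succ_cons]
        rw [htake]
        simp only [pvGoA]
        by_cases hbr : v - czas ≤ 0
        · rw [if_pos hbr, if_neg (by omega)]
        · rw [if_neg hbr, if_pos (by omega)]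
          rw [PySem.List.remove?_eq_some_erase pool v hv]
          exact ih (pool.erase v).length (by omega) _ rfl _ _

-- ===== VERDICT (by name: the statement is the Claim_ definition above) =====
theorem snow_spec : Claim_equal_snow := by
  intro S _
  unfold Spec_snow snow snow_alt
  rw [pvSelectLoopB_eq_goA S.length S rfl, sorted_rev_eq_reverse]
  have hlen : (pvMergeSortA S).length = S.length := (pvMergeSortA_perm S).length_eq
  rcases Nat.eq_zero_or_pos S.length with h0 | hpos
  · have hS : S = [] := List.length_eq_zero_iff.1 h0
    subst hS
    have hw : pvMergeSortA [] = ([] : List Int) := List.length_eq_zero_iff.1 (by omega)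
    simp only [hw]
    simp [pvSnowLoopA, pvGoA]
  · have hi : (pvMergeSortA S).length - 1 < (pvMergeSortA S).length := by omega
    rw [pvSnowLoopA_eq_goA _ ((pvMergeSortA S).length - 1) hi 0 0]
    have htak : (pvMergeSortA S).take ((pvMergeSortA S).length - 1 + 1) = pvMergeSortA S := by
      rw [Nat.sub_add_cancel (by omega)]; exact List.take_length
    have hpref : (pvMergeSortA S).reverse.take (S.length - 1)
        = (((pvMergeSortA S).take ((pvMergeSortA S).length - 1 + 1)).drop 1).reverse := by
      rw [htak, List.take_reverse]
      congr 2
      omega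
    rw [hpref]
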